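-- pv_equiv track=rewrite | github.com/lew1464313834-ctrl/DES | generate_ACAG_helper.py | cal_unobservable_reach
-- ===== SOURCE A (Python) =====
-- from collections import deque, defaultdict
--
-- def cal_unobservable_reach(states_current_estimation,
--                                       transition,
--                                       events_unobeservable,
--                                       max_depth=15):
--     state_next_estiamtion_supervisor = set(states_current_estimation)
--     queue = deque([(s, 0) for s in states_current_estimation])
--
--     while queue:
--         curr_state, depth = queue.popleft()
--         if depth >= max_depth:
--             continue
--         # 搜索所有以当前预估为起点的不可观测转移
--         for (src, event), target in transition.items():
--             if src == curr_state and event in events_unobeservable: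
--                 if target not in state_next_estiamtion_supervisor:
--                     state_next_estiamtion_supervisor.add(target)
--                     queue.append((target, depth + 1))
--     return frozenset(state_next_estiamtion_supervisor)
-- ===== SOURCE B (Python) =====
-- def cal_unobservable_reach(states_current_estimation,
--                            transition,
--                            events_unobeservable,
--                            max_depth=15):
--     # Index the transitions once: src -> list of targets reachable by one
--     # unobservable event (in transition order), so the per-state loop no
--     # longer scans the whole transition table.
--     unobs = set(events_unobeservable)
--     adj = {}
--     for (src, event), target in transition.items():
--         if event in unobs:
--             adj.setdefault(src, []).append(target)
--
--     reached = set(states_current_estimation)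
--     frontier = list(states_current_estimation)
--     depth = 0
--     while frontier and depth < max_depth:
--         next_frontier = []
--         for state in frontier:
--             for target in adj.get(state, []):
--                 if target not in reached:
--                     reached.add(target)
--                     next_frontier.append(target)
--         frontier = next_frontier
--         depth += 1
--     return frozenset(reached)
-- ===== Notes on version B (the rewrite author's own statement) =====
-- stated objective: faster
-- what changed: B builds an adjacency index (src -> unobservable-successor targets) from the transition dict in one pass and then expands breadth levels over that index, so A's rescan of the whole transition table for every popped state disappears.
import Mathlib
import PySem

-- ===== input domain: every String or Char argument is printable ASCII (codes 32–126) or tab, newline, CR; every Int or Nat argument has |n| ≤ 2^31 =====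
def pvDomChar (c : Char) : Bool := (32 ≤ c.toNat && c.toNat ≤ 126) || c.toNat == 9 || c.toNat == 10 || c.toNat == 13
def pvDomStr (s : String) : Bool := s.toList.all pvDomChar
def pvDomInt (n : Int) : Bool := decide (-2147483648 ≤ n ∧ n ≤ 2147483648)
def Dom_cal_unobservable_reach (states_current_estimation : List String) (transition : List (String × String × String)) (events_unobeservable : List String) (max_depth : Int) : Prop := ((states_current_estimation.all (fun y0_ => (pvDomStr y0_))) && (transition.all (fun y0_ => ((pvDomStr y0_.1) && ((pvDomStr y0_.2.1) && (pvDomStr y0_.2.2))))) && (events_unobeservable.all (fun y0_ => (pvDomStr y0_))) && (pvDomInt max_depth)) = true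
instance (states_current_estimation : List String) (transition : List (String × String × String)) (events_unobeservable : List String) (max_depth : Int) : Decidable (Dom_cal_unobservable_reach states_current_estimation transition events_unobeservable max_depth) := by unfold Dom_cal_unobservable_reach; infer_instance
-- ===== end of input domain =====

-- B indexes the transition table once into an adjacency dict (src -> unobservable-successor
-- targets) and then runs a depth-bounded level loop over that index, so the per-state scan of
-- the whole transition table disappears; equivalence is about the returned set's element list.

-- ===== PORT A =====
-- one step of A's inner 'for (src, event), target in transition.items()' loop:
-- acc = (visited set, entries appended to the queue at depth d+1)
def pvStepA (events_unobeservable : List String) (curr_state : String) (depth : Int)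
    (acc : List String × List (String × Int)) (t : String × String × String) :
    List String × List (String × Int) :=
  if t.1 = curr_state ∧ t.2.1 ∈ events_unobeservable then
    if t.2.2 ∈ acc.1 then acc
    else (PySem.Set.add acc.1 t.2.2, acc.2 ++ [(t.2.2, depth + 1)])
  else acc

-- A's whole inner for-loop for one popped (curr_state, depth)
def pvScanA (transition : List (String × String × String)) (events_unobeservable : List String)
    (curr_state : String) (depth : Int) (visited : List String) :
    List String × List (String × Int) :=
  transition.foldl (pvStepA events_unobeservable curr_state depth) (visited, [])

-- termination measure: how many transition targets are not yet visited
def pvFree (transition : List (String × String × String)) (visited : List String) : Nat :=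
  ((transition.map (fun t => t.2.2)).toFinset \ visited.toFinset).card

-- the inner loop only ever moves targets from "free" to the visited set, one per queue entry
theorem pvStepA_fold_measure (transition : List (String × String × String)) :
    ∀ (ts : List (String × String × String)),
      (∀ t ∈ ts, t.2.2 ∈ transition.map (fun t => t.2.2)) →
      ∀ (events_unobeservable : List String) (curr_state : String) (depth : Int)
        (visited : List String) (acc : List (String × Int)),
        pvFree transition (ts.foldl (pvStepA events_unobeservable curr_state depth) (visited, acc)).1
          + (ts.foldl (pvStepA events_unobeservable curr_state depth) (visited, acc)).2.length
        = pvFree transition visited + acc.length := by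
  intro ts
  induction ts with
  | nil => intro _ ev s d v acc; simp
  | cons t ts ih =>
    intro h ev s d v acc
    have ht : t.2.2 ∈ transition.map (fun t => t.2.2) := h t (by simp)
    have hts : ∀ t' ∈ ts, t'.2.2 ∈ transition.map (fun t => t.2.2) := fun t' m => h t' (by simp [m])
    simp only [List.foldl_cons]
    by_cases h1 : t.1 = s ∧ t.2.1 ∈ ev
    · by_cases h2 : t.2.2 ∈ v
      · simp [pvStepA, h1, h2, ih hts]
      · have hadd : PySem.Set.add v t.2.2 = v ++ [t.2.2] := PySem.Set.add_of_not_mem h2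
        simp only [pvStepA, h1, and_self, if_true, h2, if_false, hadd,
          ih hts ev s d (v ++ [t.2.2]) (acc ++ [(t.2.2, d + 1)])]
        have hfree : pvFree transition (v ++ [t.2.2]) + 1 = pvFree transition v := by
          unfold pvFree
          have : (v ++ [t.2.2]).toFinset = insert t.2.2 v.toFinset := by
            simp [List.toFinset_append]
          rw [this]
          have hx : t.2.2 ∈ (transition.map (fun t => t.2.2)).toFinset \ v.toFinset := by
            simp [List.mem_toFinset.mpr ht, h2]
          rw [Finset.sdiff_insert]
          exact Finset.card_erase_add_one hx
        simp only [List.length_append, List.length_cons, List.length_nil]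
        omega
    · simp [pvStepA, h1, ih hts]

theorem pvScanA_measure (transition : List (String × String × String))
    (events_unobeservable : List String) (curr_state : String) (depth : Int)
    (visited : List String) :
    pvFree transition (pvScanA transition events_unobeservable curr_state depth visited).1
      + (pvScanA transition events_unobeservable curr_state depth visited).2.length
    = pvFree transition visited := by
  have := pvStepA_fold_measure transition transition (fun _ m => List.mem_map_of_mem m)
    events_unobeservable curr_state depth visited []
  simpa [pvScanA] using this

-- A's while-loop over the FIFO queue of (state, depth) pairs
def pvLoopA (transition : List (String × String × String)) (events_unobeservable : List String)
    (max_depth : Int) : List String → List (String × Int) → List String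
  | visited, [] => visited
  | visited, (curr_state, depth) :: rest =>
    if max_depth ≤ depth then
      pvLoopA transition events_unobeservable max_depth visited rest
    else
      pvLoopA transition events_unobeservable max_depth
        (pvScanA transition events_unobeservable curr_state depth visited).1
        (rest ++ (pvScanA transition events_unobeservable curr_state depth visited).2)
termination_by visited queue => pvFree transition visited * (transition.length + 1) + queue.length
decreasing_by
  · simp
  · have hm := pvScanA_measure transition events_unobeservable curr_state depth visited
    set F' := pvFree transition (pvScanA transition events_unobeservable curr_state depth visited).1
    set m := (pvScanA transition events_unobeservable curr_state depth visited).2.length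
    have : pvFree transition visited * (transition.length + 1)
        = F' * (transition.length + 1) + m * (transition.length + 1) := by
      rw [← hm]; ring
    have hmle : m ≤ m * (transition.length + 1) := Nat.le_mul_of_pos_right _ (by omega)
    simp only [List.length_append, List.length_cons]
    omega

def cal_unobservable_reach (states_current_estimation : List String) (transition : List (String × String × String)) (events_unobeservable : List String) (max_depth : Int) : List String :=
  pvLoopA transition events_unobeservable max_depth
    (PySem.Set.ofList states_current_estimation)
    (states_current_estimation.map (fun s => (s, (0 : Int))))

-- ===== PORT B =====
-- B's first pass: 'for (src, event), target in transition.items(): if event in unobs: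
-- adj.setdefault(src, []).append(target)' — the adjacency index, built once
def pvAdjB (transition : List (String × String × String)) (unobs : List String) :
    PySem.Dict String (List String) :=
  transition.foldl
    (fun d t => if t.2.1 ∈ unobs then d.modify t.1 [] (· ++ [t.2.2]) else d)
    PySem.Dict.empty

-- B's 'if target not in reached: reached.add(target); next_frontier.append(target)'
def pvAddB (acc : List String × List String) (target : String) : List String × List String :=
  if target ∉ acc.1 then (PySem.Set.add acc.1 target, acc.2 ++ [target]) else acc

-- B's one while-iteration body: for each frontier state, walk adj.get(state, [])
def pvLevelB (adj : PySem.Dict String (List String))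
    (acc : List String × List String) (frontier : List String) : List String × List String :=
  frontier.foldl (fun acc state => (adj.getD state []).foldl pvAddB acc) acc

-- B's 'while frontier and depth < max_depth' loop, as recursion on max_depth - depth
def pvLoopB (adj : PySem.Dict String (List String)) :
    Nat → List String → List String → List String
  | 0, reached, _ => reached
  | _ + 1, reached, [] => reached
  | k + 1, reached, frontier =>
    pvLoopB adj k
      (pvLevelB adj (reached, []) frontier).1
      (pvLevelB adj (reached, []) frontier).2

def cal_unobservable_reach_alt (states_current_estimation : List String) (transition : List (String × String × String)) (events_unobeservable : List String) (max_depth : Int) : List String :=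
  pvLoopB (pvAdjB transition (PySem.Set.ofList events_unobeservable)) max_depth.toNat
    (PySem.Set.ofList states_current_estimation)
    states_current_estimation

-- ===== PRECONDITION & SPEC =====
def Spec_cal_unobservable_reach (states_current_estimation : List String) (transition : List (String × String × String)) (events_unobeservable : List String) (max_depth : Int) (out : List String) : Prop := out = cal_unobservable_reach_alt states_current_estimation transition events_unobeservable max_depth
instance (states_current_estimation : List String) (transition : List (String × String × String)) (events_unobeservable : List String) (max_depth : Int) (out : List String) : Decidable (Spec_cal_unobservable_reach states_current_estimation transition events_unobeservable max_depth out) := by unfold Spec_cal_unobservable_reach; infer_instance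

-- ===== CLAIM (what is proved, stated in full; the proofs are below) =====
def Claim_equal_cal_unobservable_reach : Prop := ∀ (states_current_estimation : List String) (transition : List (String × String × String)) (events_unobeservable : List String) (max_depth : Int), Dom_cal_unobservable_reach states_current_estimation transition events_unobeservable max_depth → Spec_cal_unobservable_reach states_current_estimation transition events_unobeservable max_depth (cal_unobservable_reach states_current_estimation transition events_unobeservable max_depth)

-- ===== LEMMAS AND PROOFS =====

-- the adjacency dict's lookup is exactly the filtered target list of the transition table
theorem pvAdjB_getD (unobs : List String) (s : String) :
    ∀ (ts : List (String × String × String)) (d : PySem.Dict String (List String)),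
      (ts.foldl (fun d t => if t.2.1 ∈ unobs then d.modify t.1 [] (· ++ [t.2.2]) else d) d).getD s []
      = d.getD s [] ++ (ts.filter (fun t => decide (t.1 = s ∧ t.2.1 ∈ unobs))).map (fun t => t.2.2) := by
  intro ts
  induction ts with
  | nil => intro d; simp
  | cons t ts ih =>
    intro d
    simp only [List.foldl_cons]
    by_cases he : t.2.1 ∈ unobs
    · rw [if_pos he]
      by_cases hs : t.1 = s
      · rw [ih]
        rw [PySem.Dict.getD_modify, if_pos hs.symm]
        simp [hs, he]
      · rw [ih]
        rw [PySem.Dict.getD_modify, if_neg (fun h => hs h.symm)]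
        simp [hs]
    · rw [if_neg he, ih]
      simp [he]

-- B's inner-fold second component is a pure accumulator
theorem pvAddB_fold_shift :
    ∀ (tgts : List String) (v : List String) (a : List String),
      tgts.foldl pvAddB (v, a)
        = ((tgts.foldl pvAddB (v, [])).1, a ++ (tgts.foldl pvAddB (v, [])).2) := by
  intro tgts
  induction tgts with
  | nil => intro v a; simp
  | cons t ts ih =>
    intro v a
    simp only [List.foldl_cons]
    dsimp only [pvAddB]
    by_cases h : t ∈ v
    · rw [if_neg (by simpa using h), if_neg (by simpa using h)]
      exact ih v a
    · rw [if_pos (by simpa using h), if_pos (by simpa using h)]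
      rw [ih (PySem.Set.add v t) (a ++ [t]), ih (PySem.Set.add v t) ([] ++ [t])]
      simp
  
-- A's inner scan over the whole transition table equals B's fold over the filtered targets,
-- with depth tags added
theorem pvScanA_eq_tgts (ev : List String) (s : String) (depth : Int) :
    ∀ (ts : List (String × String × String)) (v : List String) (accB : List String),
      ts.foldl (pvStepA ev s depth) (v, accB.map (fun x => (x, depth + 1)))
      = ((((ts.filter (fun t => decide (t.1 = s ∧ t.2.1 ∈ ev))).map (fun t => t.2.2)).foldl pvAddB (v, accB)).1,
         (((ts.filter (fun t => decide (t.1 = s ∧ t.2.1 ∈ ev))).map (fun t => t.2.2)).foldl pvAddB (v, accB)).2.map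
           (fun x => (x, depth + 1))) := by
  intro ts
  induction ts with
  | nil => intro v accB; simp
  | cons t ts ih =>
    intro v accB
    simp only [List.foldl_cons]
    by_cases h1 : t.1 = s ∧ t.2.1 ∈ ev
    · rw [List.filter_cons_of_pos (by simpa using h1)]
      simp only [List.map_cons, List.foldl_cons]
      dsimp only [pvStepA, pvAddB]
      rw [if_pos h1]
      by_cases h2 : t.2.2 ∈ v
      · rw [if_pos h2, if_neg (by simpa using h2)]
        exact ih v accB
      · rw [if_neg h2, if_pos (by simpa using h2)]
        have hmap : accB.map (fun x => (x, depth + 1)) ++ [(t.2.2, depth + 1)]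
            = (accB ++ [t.2.2]).map (fun x => (x, depth + 1)) := by simp
        rw [hmap]
        exact ih (PySem.Set.add v t.2.2) (accB ++ [t.2.2])
    · rw [List.filter_cons_of_neg (by simpa using h1)]
      dsimp only [pvStepA]
      rw [if_neg h1]
      exact ih v accB

-- pvScanA written through B's adjacency dict
theorem pvScanA_eq_adj (transition : List (String × String × String)) (ev : List String)
    (s : String) (depth : Int) (v : List String) :
    pvScanA transition ev s depth v
      = ((((pvAdjB transition (PySem.Set.ofList ev)).getD s []).foldl pvAddB (v, [])).1,
         ((((pvAdjB transition (PySem.Set.ofList ev)).getD s []).foldl pvAddB (v, [])).2).map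
           (fun x => (x, depth + 1))) := by
  have hadj : (pvAdjB transition (PySem.Set.ofList ev)).getD s []
      = (transition.filter (fun t => decide (t.1 = s ∧ t.2.1 ∈ ev))).map (fun t => t.2.2) := by
    unfold pvAdjB
    rw [pvAdjB_getD (PySem.Set.ofList ev) s transition PySem.Dict.empty]
    simp only [PySem.Dict.getD_empty, List.nil_append]
    congr 1
    apply List.filter_congr
    intro t _
    simp [PySem.Set.mem_ofList]
  rw [hadj]
  have := pvScanA_eq_tgts ev s depth transition v []
  simpa [pvScanA] using this

-- queue entries at or beyond max_depth are popped and skipped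
theorem pvLoopA_skip (transition : List (String × String × String))
    (events_unobeservable : List String) (max_depth : Int) (depth : Int)
    (h : max_depth ≤ depth) :
    ∀ (frontier : List String) (visited : List String),
      pvLoopA transition events_unobeservable max_depth visited
        (frontier.map (fun s => (s, depth))) = visited := by
  intro frontier
  induction frontier with
  | nil => intro v; simp [pvLoopA]
  | cons s rest ih => intro v; simp only [List.map_cons]; rw [pvLoopA, if_pos h]; exact ih v

-- processing one breadth level: A's queue run over 'pending' at depth d equals B's level fold
theorem pvLoopA_level (transition : List (String × String × String))
    (events_unobeservable : List String) (max_depth : Int) (depth : Int)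
    (h : ¬ max_depth ≤ depth) :
    ∀ (pending : List String) (visited : List String) (part : List String),
      pvLoopA transition events_unobeservable max_depth visited
        (pending.map (fun s => (s, depth)) ++ part.map (fun s => (s, depth + 1)))
      = pvLoopA transition events_unobeservable max_depth
          (pvLevelB (pvAdjB transition (PySem.Set.ofList events_unobeservable)) (visited, part) pending).1
          ((pvLevelB (pvAdjB transition (PySem.Set.ofList events_unobeservable)) (visited, part) pending).2.map
            (fun s => (s, depth + 1))) := by
  intro pending
  induction pending with
  | nil => intro v part; simp [pvLevelB]
  | cons s rest ih =>
    intro v part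
    simp only [List.map_cons, List.cons_append]
    rw [pvLoopA, if_neg h]
    rw [pvScanA_eq_adj transition events_unobeservable s depth v]
    set adj := pvAdjB transition (PySem.Set.ofList events_unobeservable) with hadj
    set r := (adj.getD s []).foldl pvAddB (v, []) with hr
    have hqueue : rest.map (fun s => (s, depth)) ++ part.map (fun s => (s, depth + 1))
        ++ r.2.map (fun x => (x, depth + 1))
        = rest.map (fun s => (s, depth)) ++ (part ++ r.2).map (fun s => (s, depth + 1)) := by
      simp
    rw [hqueue, ih]
    have hlev : pvLevelB adj (v, part) (s :: rest)
        = pvLevelB adj (r.1, part ++ r.2) rest := by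
      simp only [pvLevelB, List.foldl_cons]
      rw [pvAddB_fold_shift (adj.getD s []) v part, ← hr]
    rw [hlev]

-- the two loops agree level by level
theorem pvLoopAB (transition : List (String × String × String))
    (events_unobeservable : List String) (max_depth : Int) :
    ∀ (k : Nat) (visited frontier : List String) (depth : Int),
      depth + (k : Int) = max_depth →
      pvLoopA transition events_unobeservable max_depth visited
        (frontier.map (fun s => (s, depth)))
      = pvLoopB (pvAdjB transition (PySem.Set.ofList events_unobeservable)) k visited frontier := by
  intro k
  induction k with
  | zero =>
    intro v f d hd
    rw [pvLoopB, pvLoopA_skip transition events_unobeservable max_depth d (by omega)]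
  | succ k ih =>
    intro v f d hd
    have hlt : ¬ max_depth ≤ d := by push_cast at hd ⊢; omega
    cases f with
    | nil => simp [pvLoopB, pvLoopA]
    | cons s rest =>
      rw [pvLoopB]
      · have := pvLoopA_level transition events_unobeservable max_depth d hlt (s :: rest) v []
        simp only [List.map_nil, List.append_nil] at this
        rw [this]
        exact ih _ _ (d + 1) (by push_cast at hd ⊢; omega)
      · simp

-- ===== VERDICT (by name: the statement is the Claim_ definition above) =====
theorem cal_unobservable_reach_spec : Claim_equal_cal_unobservable_reach := by
  intro sce transition events md _
  unfold Spec_cal_unobservable_reach cal_unobservable_reach cal_unobservable_reach_alt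
  by_cases h : md ≤ 0
  · have h0 : md.toNat = 0 := Int.toNat_of_nonpos h
    rw [h0, pvLoopB, pvLoopA_skip transition events md 0 h]
  · exact pvLoopAB transition events md md.toNat _ sce 0
      (by rw [Int.toNat_of_nonneg (by omega)]; ring)
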